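-- pv_equiv track=rewrite | github.com/Haoming02/PMX-Scripting-Tools | python/_prune_unused_bones.py | delme_list_to_rangemap
-- ===== SOURCE A (Python) =====
-- def delme_list_to_rangemap(delme_verts: list) -> list:
-- 	# convert from individual vertices to list of ranges, [start-length]
-- 	# start begins 0, end begins 1
-- 	delme_range = []
-- 	start_idx = 0
-- 	for end_idx in range(1, len(delme_verts) + 1):
-- 		if (end_idx == len(delme_verts)) or (delme_verts[end_idx] != (delme_verts[end_idx - 1] + 1)):
-- 			# if the next vert ID is non-contiguous, or is the end of the list, that defines a breakpoint between ranges
-- 			# that means that everything from start to end IS contiguous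
-- 			# so save the VALUE of the start, and the LENGTH of the range (which equals the length of the block)
-- 			delme_range.append([delme_verts[start_idx], end_idx - start_idx])
-- 			start_idx = end_idx
-- 	# convert from [start-length] to [start-cumulativelength]
-- 	for i in range(1, len(delme_range)):
-- 		delme_range[i][1] += delme_range[i - 1][1]
-- 	return delme_range
-- ===== SOURCE B (Python) =====
-- def delme_list_to_rangemap(delme_verts: list) -> list:
-- 	# cumulative length of each range equals its breakpoint index, so list the
-- 	# breakpoint indices once and pair each with the previous one (the range start)
-- 	n = len(delme_verts)
-- 	bnds = [i for i in range(1, n + 1)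
-- 	        if i == n or delme_verts[i] != delme_verts[i - 1] + 1]
-- 	return [[delme_verts[s], e] for s, e in zip([0] + bnds, bnds)]
-- ===== Notes on version B (the rewrite author's own statement) =====
-- stated objective: simpler
-- what changed: B exploits the identity that each range's cumulative length equals its breakpoint index: it lists the breakpoint indices once and zips them with their predecessors (the range starts), emitting [start-value, end-index] rows directly, with no run-building state machine and no second cumulative-sum pass.
import Mathlib
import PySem

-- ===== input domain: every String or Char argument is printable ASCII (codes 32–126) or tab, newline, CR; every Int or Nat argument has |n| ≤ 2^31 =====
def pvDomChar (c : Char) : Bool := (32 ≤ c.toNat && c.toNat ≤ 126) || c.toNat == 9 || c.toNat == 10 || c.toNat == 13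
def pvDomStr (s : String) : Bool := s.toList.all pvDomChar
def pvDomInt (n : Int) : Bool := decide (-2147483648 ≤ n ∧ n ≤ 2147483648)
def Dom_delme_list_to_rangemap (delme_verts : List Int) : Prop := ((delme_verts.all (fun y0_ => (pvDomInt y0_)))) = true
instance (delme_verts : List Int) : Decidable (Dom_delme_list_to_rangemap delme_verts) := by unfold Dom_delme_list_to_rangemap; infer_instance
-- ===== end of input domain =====

-- B uses the identity 'cumulative length of a range = its breakpoint index': it filters the
-- breakpoint indices and zips them with their predecessors, so A's run-building state machine
-- and its second cumulative-sum pass disappear (objective: simpler; same O(n) cost).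

-- ===== PORT A =====
-- first loop: every pyGetD read is at an in-range index when it is reached (the end_idx = n
-- disjunct short-circuits first in Python), so the default 0 is never produced; exact.
def delme_list_to_rangemap (delme_verts : List Int) : List (List Int) :=
  let n : Int := delme_verts.length
  let p := (PySem.List.pyRange 1 (n + 1) 1).foldl
    (fun (st : List (List Int) × Int) end_idx =>
      if end_idx = n ∨ PySem.List.pyGetD delme_verts end_idx 0 ≠ PySem.List.pyGetD delme_verts (end_idx - 1) 0 + 1 then
        (st.1 ++ [[PySem.List.pyGetD delme_verts st.2 0, end_idx - st.2]], end_idx)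
      else st) ([], 0)
  let delme_range := p.1
  -- second loop: in-place 'delme_range[i][1] += delme_range[i-1][1]' ported as modify (i ≥ 1, in range)
  (PySem.List.pyRange 1 (delme_range.length : Int) 1).foldl
    (fun r i => r.modify i.toNat
      (fun row => row.modify 1 (· + PySem.List.pyGetD (PySem.List.pyGetD r (i - 1) []) 1 0))) delme_range

-- ===== PORT B =====
-- comprehension over range(1, n+1) with a condition = filter; zip([0]+bnds, bnds) = zip on lists
-- (truncates at the shorter list, as in Python); every index read is in range, default unused.
def delme_list_to_rangemap_alt (delme_verts : List Int) : List (List Int) :=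
  let n : Int := delme_verts.length
  let bnds := (PySem.List.pyRange 1 (n + 1) 1).filter
    (fun i => decide (i = n ∨ PySem.List.pyGetD delme_verts i 0 ≠ PySem.List.pyGetD delme_verts (i - 1) 0 + 1))
  ((0 :: bnds).zip bnds).map (fun p => [PySem.List.pyGetD delme_verts p.1 0, p.2])

-- ===== PRECONDITION & SPEC =====
def Spec_delme_list_to_rangemap (delme_verts : List Int) (out : List (List Int)) : Prop := out = delme_list_to_rangemap_alt delme_verts
instance (delme_verts : List Int) (out : List (List Int)) : Decidable (Spec_delme_list_to_rangemap delme_verts out) := by unfold Spec_delme_list_to_rangemap; infer_instance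

-- ===== CLAIM (what is proved, stated in full; the proofs are below) =====
def Claim_equal_delme_list_to_rangemap : Prop := ∀ (delme_verts : List Int), Dom_delme_list_to_rangemap delme_verts → Spec_delme_list_to_rangemap delme_verts (delme_list_to_rangemap delme_verts)

-- ===== LEMMAS AND PROOFS =====

-- abstract tail-recursive form of A's first loop: sv = value at start_idx, last = previous value,
-- k = current run length so far
def pvT (sv last k : Int) : List Int → List (List Int) → List (List Int)
  | [], acc => acc ++ [[sv, k]]
  | y :: ys, acc => if y = last + 1 then pvT sv y (k + 1) ys acc else pvT y y 1 ys (acc ++ [[sv, k]])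

-- cumulative rewrite of a row list, mirroring A's second loop step exactly
def pvCum : Int → List (List Int) → List (List Int)
  | _, [] => []
  | t, row :: rest => (row.modify 1 (· + t)) :: pvCum ((row.modify 1 (· + t)).getD 1 0) rest

-- reference value: rows [start value, absolute end index], j = current 1-based position
def pvR (sv last j : Int) : List Int → List (List Int)
  | [] => [[sv, j]]
  | y :: ys => if y = last + 1 then pvR sv y (j + 1) ys else [sv, j] :: pvR y y (j + 1) ys

lemma pv_getD_of_drop (l cur : List Int) (j : Nat) (y : Int) (ys : List Int)
    (h : l.drop j = cur) (hc : cur = y :: ys) : l.getD j 0 = y := by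
  subst hc
  have h0 : l[j]? = some y := by
    have hd : (l.drop j)[0]? = l[j + 0]? := List.getElem?_drop
    rw [h] at hd
    simpa using hd.symm
  simp [List.getD_eq_getElem?_getD, h0]

lemma pv_lemA (cur : List Int) : ∀ (l : List Int) (j st : Nat) (acc : List (List Int)),
    0 < j → st < j → l.drop j = cur → j ≤ l.length →
    ((PySem.List.pyRange (j : Int) ((l.length : Int) + 1) 1).foldl
      (fun (stt : List (List Int) × Int) end_idx =>
        if end_idx = (l.length : Int) ∨ PySem.List.pyGetD l end_idx 0 ≠ PySem.List.pyGetD l (end_idx - 1) 0 + 1 then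
          (stt.1 ++ [[PySem.List.pyGetD l stt.2 0, end_idx - stt.2]], end_idx)
        else stt) (acc, (st : Int))).1
    = pvT (l.getD st 0) (l.getD (j - 1) 0) ((j : Int) - (st : Int)) cur acc := by
  induction cur with
  | nil =>
    intro l j st acc hj hst hdrop hle
    have hjl : j = l.length := le_antisymm hle (List.drop_eq_nil_iff.mp hdrop)
    subst hjl
    rw [PySem.List.pyRange_one_singleton]
    simp only [List.foldl_cons, List.foldl_nil, pvT]
    simp [PySem.List.pyGetD_natCast]
  | cons y ys ih =>
    intro l j st acc hj hst hdrop hle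
    have hjlt : j < l.length := by
      by_contra hnot
      have : l.drop j = [] := List.drop_eq_nil_iff.mpr (by omega)
      simp [this] at hdrop
    have hy : l.getD j 0 = y := pv_getD_of_drop l (y :: ys) j y ys hdrop rfl
    have hdrop' : l.drop (j + 1) = ys := by
      have h1 : l.drop (j + 1) = (l.drop j).drop 1 := by rw [List.drop_drop, Nat.add_comm]
      rw [h1, hdrop]; rfl
    rw [PySem.List.pyRange_one_cons (by exact_mod_cast Nat.lt_succ_of_lt hjlt)]
    simp only [List.foldl_cons]
    have hcast1 : (j : Int) - 1 = ((j - 1 : Nat) : Int) := by omega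
    have hget_j : PySem.List.pyGetD l (j : Int) 0 = y := by
      rw [PySem.List.pyGetD_natCast]; exact hy
    have hget_j1 : PySem.List.pyGetD l ((j : Int) - 1) 0 = l.getD (j - 1) 0 := by
      rw [hcast1, PySem.List.pyGetD_natCast]
    have hsucc : ((j : Int) + 1) = ((j + 1 : Nat) : Int) := by push_cast; ring
    by_cases hbr : y = l.getD (j - 1) 0 + 1
    · -- no breakpoint: condition is False
      have hcond : ¬((j : Int) = (l.length : Int) ∨ PySem.List.pyGetD l (j : Int) 0 ≠ PySem.List.pyGetD l ((j : Int) - 1) 0 + 1) := by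
        rw [hget_j, hget_j1]
        rintro (he | hne)
        · exact absurd he (by exact_mod_cast Nat.ne_of_lt hjlt)
        · exact hne hbr
      rw [if_neg hcond]
      rw [hsucc, ih l (j + 1) st acc (by omega) (by omega) hdrop' (by omega)]
      rw [Nat.add_sub_cancel, hy]
      conv_rhs => rw [pvT]
      rw [if_pos hbr]
      congr 1
      push_cast; ring
    · -- breakpoint
      have hcond : ((j : Int) = (l.length : Int) ∨ PySem.List.pyGetD l (j : Int) 0 ≠ PySem.List.pyGetD l ((j : Int) - 1) 0 + 1) := by
        rw [hget_j, hget_j1]; exact Or.inr hbr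
      rw [if_pos hcond]
      rw [hsucc, ih l (j + 1) j (acc ++ [[PySem.List.pyGetD l (st : Int) 0, (j : Int) - (st : Int)]]) (by omega) (by omega) hdrop' (by omega)]
      rw [Nat.add_sub_cancel, hy]
      conv_rhs => rw [pvT]
      rw [if_neg hbr]
      rw [PySem.List.pyGetD_natCast]
      congr 1
      push_cast; ring

-- B's filter+zip+map over the remaining suffix equals the reference pvR
lemma pv_lemF (cur : List Int) : ∀ (l : List Int) (j st : Nat),
    0 < j → st < j → l.drop j = cur → j ≤ l.length →
    (((st : Int) :: (PySem.List.pyRange (j : Int) ((l.length : Int) + 1) 1).filter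
        (fun i => decide (i = (l.length : Int) ∨ PySem.List.pyGetD l i 0 ≠ PySem.List.pyGetD l (i - 1) 0 + 1))).zip
      ((PySem.List.pyRange (j : Int) ((l.length : Int) + 1) 1).filter
        (fun i => decide (i = (l.length : Int) ∨ PySem.List.pyGetD l i 0 ≠ PySem.List.pyGetD l (i - 1) 0 + 1)))).map
      (fun p => [PySem.List.pyGetD l p.1 0, p.2])
    = pvR (l.getD st 0) (l.getD (j - 1) 0) (j : Int) cur := by
  induction cur with
  | nil =>
    intro l j st hj hst hdrop hle
    have hjl : j = l.length := le_antisymm hle (List.drop_eq_nil_iff.mp hdrop)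
    subst hjl
    rw [PySem.List.pyRange_one_singleton]
    simp [pvR, PySem.List.pyGetD_natCast]
  | cons y ys ih =>
    intro l j st hj hst hdrop hle
    have hjlt : j < l.length := by
      by_contra hnot
      have : l.drop j = [] := List.drop_eq_nil_iff.mpr (by omega)
      simp [this] at hdrop
    have hy : l.getD j 0 = y := pv_getD_of_drop l (y :: ys) j y ys hdrop rfl
    have hdrop' : l.drop (j + 1) = ys := by
      have h1 : l.drop (j + 1) = (l.drop j).drop 1 := by rw [List.drop_drop, Nat.add_comm]
      rw [h1, hdrop]; rfl
    rw [PySem.List.pyRange_one_cons (by exact_mod_cast Nat.lt_succ_of_lt hjlt)]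
    have hcast1 : (j : Int) - 1 = ((j - 1 : Nat) : Int) := by omega
    have hget_j : PySem.List.pyGetD l (j : Int) 0 = y := by
      rw [PySem.List.pyGetD_natCast]; exact hy
    have hget_j1 : PySem.List.pyGetD l ((j : Int) - 1) 0 = l.getD (j - 1) 0 := by
      rw [hcast1, PySem.List.pyGetD_natCast]
    have hsucc : ((j : Int) + 1) = ((j + 1 : Nat) : Int) := by push_cast; ring
    simp only [List.filter_cons, decide_eq_true_eq]
    by_cases hbr : y = l.getD (j - 1) 0 + 1
    · -- no breakpoint: the filter drops j
      have hcond : ¬((j : Int) = (l.length : Int) ∨ PySem.List.pyGetD l (j : Int) 0 ≠ PySem.List.pyGetD l ((j : Int) - 1) 0 + 1) := by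
        rw [hget_j, hget_j1]
        rintro (he | hne)
        · exact absurd he (by exact_mod_cast Nat.ne_of_lt hjlt)
        · exact hne hbr
      rw [if_neg hcond]
      rw [hsucc, ih l (j + 1) st (by omega) (by omega) hdrop' (by omega)]
      rw [Nat.add_sub_cancel, hy]
      conv_rhs => rw [pvR]
      rw [if_pos hbr, hsucc]
    · -- breakpoint: the filter keeps j
      have hcond : ((j : Int) = (l.length : Int) ∨ PySem.List.pyGetD l (j : Int) 0 ≠ PySem.List.pyGetD l ((j : Int) - 1) 0 + 1) := by
        rw [hget_j, hget_j1]; exact Or.inr hbr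
      rw [if_pos hcond]
      simp only [List.zip_cons_cons, List.map_cons]
      rw [show ((j : Int) :: (PySem.List.pyRange ((j : Int) + 1) ((l.length : Int) + 1) 1).filter
            (fun i => decide (i = (l.length : Int) ∨ PySem.List.pyGetD l i 0 ≠ PySem.List.pyGetD l (i - 1) 0 + 1)))
          = (((j : Nat) : Int) :: (PySem.List.pyRange ((j : Int) + 1) ((l.length : Int) + 1) 1).filter
            (fun i => decide (i = (l.length : Int) ∨ PySem.List.pyGetD l i 0 ≠ PySem.List.pyGetD l (i - 1) 0 + 1))) from rfl]
      rw [hsucc, ih l (j + 1) j (by omega) (by omega) hdrop' (by omega)]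
      rw [Nat.add_sub_cancel, hy]
      conv_rhs => rw [pvR]
      rw [if_neg hbr]
      rw [PySem.List.pyGetD_natCast, hsucc]

-- pvT only appends to its accumulator
lemma pvT_acc (cur : List Int) : ∀ (sv last k : Int) (acc : List (List Int)),
    pvT sv last k cur acc = acc ++ pvT sv last k cur [] := by
  induction cur with
  | nil => intro sv last k acc; simp [pvT]
  | cons y ys ih =>
    intro sv last k acc
    by_cases hy : y = last + 1
    · simp only [pvT, if_pos hy]; exact ih sv y (k + 1) acc
    · simp only [pvT, if_neg hy]
      rw [ih y y 1 (acc ++ [[sv, k]]),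
        show ([] : List (List Int)) ++ [[sv, k]] = [[sv, k]] from rfl, ih y y 1 [[sv, k]]]
      simp [List.append_assoc]

lemma pvT_ne_nil (cur : List Int) : ∀ (sv last k : Int) (acc : List (List Int)),
    pvT sv last k cur acc ≠ [] := by
  induction cur with
  | nil => intro sv last k acc; simp [pvT]
  | cons y ys ih =>
    intro sv last k acc
    simp only [pvT]
    split <;> apply ih

lemma pv_modify_pair (a b t : Int) : ([a, b] : List Int).modify 1 (· + t) = [a, b + t] := by
  simp [List.modify]

-- cumulating pvT's [start, length] rows yields pvR's [start, end-index] rows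
lemma pv_cumT (cur : List Int) : ∀ (sv last j t : Int),
    pvCum t (pvT sv last (j - t) cur []) = pvR sv last j cur := by
  induction cur with
  | nil =>
    intro sv last j t
    simp only [pvT, List.nil_append, pvCum, pvR, pv_modify_pair]
    norm_num
  | cons y ys ih =>
    intro sv last j t
    by_cases hy : y = last + 1
    · simp only [pvT, if_pos hy, pvR]
      rw [show j - t + 1 = (j + 1) - t from by ring]
      exact ih sv y (j + 1) t
    · simp only [pvT, if_neg hy, pvR, List.nil_append]
      rw [pvT_acc, List.singleton_append]
      simp only [pvCum, pv_modify_pair]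
      rw [show j - t + t = j from by ring]
      simp only [List.getD_cons_succ, List.getD_cons_zero]
      rw [show (1 : Int) = (j + 1) - j from by ring, ih y y (j + 1) j]
      norm_num

-- getD at (done.length - 1) on an append hits done's last element
lemma pv_getD_append_last (done : List (List Int)) (h : done ≠ []) (rest : List (List Int)) :
    (done ++ rest).getD (done.length - 1) [] = done.getLast h := by
  induction done with
  | nil => exact absurd rfl h
  | cons d ds ih =>
    cases ds with
    | nil => simp
    | cons d2 ds2 =>
      have : (d :: d2 :: ds2).length - 1 = ((d2 :: ds2).length - 1) + 1 := by
        simp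
      rw [this]
      simpa [List.getD] using ih (by simp)

lemma pv_modify_append_cons {α : Type} (done : List α) (row : α) (rest : List α) (f : α → α) :
    (done ++ row :: rest).modify done.length f = done ++ f row :: rest := by
  induction done with
  | nil => simp [List.modify]
  | cons d ds ih => simpa [List.modify] using ih

lemma pv_lemP2 (todo : List (List Int)) : ∀ (done : List (List Int)) (h : done ≠ []),
    ((PySem.List.pyRange (done.length : Int) ((done.length : Int) + (todo.length : Int)) 1).foldl
      (fun r i => r.modify i.toNat
        (fun row => row.modify 1 (· + PySem.List.pyGetD (PySem.List.pyGetD r (i - 1) []) 1 0)))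
      (done ++ todo))
    = done ++ pvCum ((done.getLast h).getD 1 0) todo := by
  induction todo with
  | nil =>
    intro done h
    rw [PySem.List.pyRange_one_eq_nil (by simp)]
    simp [pvCum]
  | cons row rest ih =>
    intro done h
    rw [PySem.List.pyRange_one_cons (by rw [List.length_cons]; push_cast; omega)]
    simp only [List.foldl_cons]
    have hprev : PySem.List.pyGetD (done ++ row :: rest) ((done.length : Int) - 1) [] = done.getLast h := by
      have hlen : done.length ≠ 0 := by simpa using h
      have hcast : (done.length : Int) - 1 = ((done.length - 1 : Nat) : Int) := by omega
      rw [hcast, PySem.List.pyGetD_natCast]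
      exact pv_getD_append_last done h (row :: rest)
    rw [hprev]
    rw [show PySem.List.pyGetD (done.getLast h) 1 0 = (done.getLast h).getD 1 0 from by
      rw [show (1 : Int) = ((1 : Nat) : Int) from rfl, PySem.List.pyGetD_natCast]]
    have htn : ((done.length : Int)).toNat = done.length := by omega
    rw [htn, pv_modify_append_cons]
    set t := (done.getLast h).getD 1 0 with ht
    set row' := row.modify 1 (· + t) with hrow'
    have hlen2 : (done ++ [row']).length = done.length + 1 := by simp
    have hre : done ++ row' :: rest = (done ++ [row']) ++ rest := by simp
    have hcast2 : (done.length : Int) + 1 = (((done ++ [row']).length : Nat) : Int) := by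
      rw [hlen2]; push_cast; ring
    have hcast3 : (done.length : Int) + ((row :: rest).length : Int)
        = ((done ++ [row']).length : Int) + (rest.length : Int) := by
      rw [hlen2, List.length_cons]; push_cast; ring
    rw [hre, hcast2, hcast3, ih (done ++ [row']) (by simp)]
    have hlast : ((done ++ [row']).getLast (by simp)) = row' := by
      rw [List.getLast_append_right (by simp)]
      rfl
    rw [hlast]
    conv_rhs => rw [pvCum]
    rw [← hrow']
    simp [List.append_assoc]

lemma pv_modify_add_zero (row : List Int) : row.modify 1 (· + 0) = row := by
  cases row with
  | nil => rfl
  | cons a t => cases t with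
    | nil => rfl
    | cons b t2 => simp [List.modify]

-- ===== VERDICT (by name: the statement is the Claim_ definition above) =====
theorem delme_list_to_rangemap_spec : Claim_equal_delme_list_to_rangemap := by
  intro l _
  unfold Spec_delme_list_to_rangemap delme_list_to_rangemap delme_list_to_rangemap_alt
  cases l with
  | nil => simp [PySem.List.pyRange_one_eq_nil]
  | cons x xs =>
    simp only []
    have hB := pv_lemF xs (x :: xs) 1 0 (by omega) (by omega) rfl (by simp)
    simp only [Nat.cast_one, Nat.cast_zero, Nat.sub_self, List.getD_cons_zero] at hB
    rw [hB]
    have h1 := pv_lemA xs (x :: xs) 1 0 [] (by omega) (by omega) rfl (by simp)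
    simp only [Nat.cast_one, Nat.cast_zero, sub_zero, Nat.sub_self, List.getD_cons_zero] at h1
    rw [h1]
    cases hgs : pvT x x 1 xs [] with
    | nil => exact absurd hgs (pvT_ne_nil xs x x 1 [])
    | cons row0 rest =>
      have hp2 := pv_lemP2 rest [row0] (by simp)
      simp only [List.length_cons, List.length_nil, Nat.zero_add, Nat.cast_one,
        List.singleton_append, List.getLast_singleton] at hp2
      rw [show (((row0 :: rest).length : Nat) : Int) = 1 + (rest.length : Int) from by
        rw [List.length_cons]; push_cast; ring]
      rw [hp2]
      rw [show row0 :: pvCum (row0.getD 1 0) rest = pvCum 0 (row0 :: rest) from by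
        rw [pvCum, pv_modify_add_zero]]
      rw [← hgs]
      rw [show pvCum 0 (pvT x x 1 xs []) = pvCum 0 (pvT x x (1 - 0) xs []) from by norm_num,
        pv_cumT]
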